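-- pv_equiv track=rewrite | github.com/trivelt/spell-corrector-pl | SpellCorrector.py | _edit1_diacritics
-- ===== SOURCE A (Python) =====
-- def _edit1_diacritics(word):
--     pairs = {
--         u'a': u'ą',
--         u'c': u'ć',
--         u'e': u'ę',
--         u'l': u'ł',
--         u'n': u'ń',
--         u'o': u'ó',
--         u's': u'ś',
--         u'z': u'ż'#, 'ź']
--     }
--
--     splits = [(word[:i], word[i:]) for i in range(len(word) + 1)]
--     e1 = list()
--     for orig_letter, new_letter in pairs.items():
--         for L, R in splits:
--             if R and R[0] == orig_letter:
--                 e1.append(L + new_letter + R[1:])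
--     return set(e1)
-- ===== SOURCE B (Python) =====
-- def _edit1_diacritics(word):
--     pairs = {
--         u'a': u'ą',
--         u'c': u'ć',
--         u'e': u'ę',
--         u'l': u'ł',
--         u'n': u'ń',
--         u'o': u'ó',
--         u's': u'ś',
--         u'z': u'ż'
--     }
--     positions = {}
--     for i, c in enumerate(word):
--         positions.setdefault(c, []).append(i)
--     return {word[:i] + new + word[i + 1:]
--             for orig, new in pairs.items()
--             for i in positions.get(orig, [])}
-- ===== Notes on version B (the rewrite author's own statement) =====
-- stated objective: alternative
-- what changed: B drops A's precomputed list of all (prefix, suffix) splits and its eight scans of that list (one per diacritic pair); instead it makes one indexing pass over the word building a positions-by-letter dict, then does eight dict lookups and builds only the matching variants.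
import Mathlib
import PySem

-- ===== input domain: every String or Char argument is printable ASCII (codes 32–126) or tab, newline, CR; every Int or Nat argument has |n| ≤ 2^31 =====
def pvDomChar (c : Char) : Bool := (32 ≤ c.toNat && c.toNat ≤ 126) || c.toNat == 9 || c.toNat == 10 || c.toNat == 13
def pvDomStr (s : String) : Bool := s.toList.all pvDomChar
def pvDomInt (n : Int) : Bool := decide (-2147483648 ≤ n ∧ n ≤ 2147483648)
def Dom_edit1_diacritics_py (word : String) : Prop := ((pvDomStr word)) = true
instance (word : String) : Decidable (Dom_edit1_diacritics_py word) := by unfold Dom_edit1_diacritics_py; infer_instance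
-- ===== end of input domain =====

-- B replaces A's precomputed splits list and its eight full scans of it by one indexing pass
-- over the word (a positions-by-letter dict) followed by eight dict lookups (alternative algorithm).

-- the literal dict of diacritic pairs, identical in Source A and Source B (keys and values are the single characters)
def pvPairs : PySem.Dict Char Char :=
  PySem.Dict.ofList [('a','ą'),('c','ć'),('e','ę'),('l','ł'),('n','ń'),('o','ó'),('s','ś'),('z','ż')]

-- ===== PORT A =====

def edit1_diacritics_py (word : String) : List String :=
  let cs := word.toList
  let splits := (PySem.List.pyRange 0 ((cs.length : Int) + 1) 1).map
    (fun i => (PySem.List.slice cs none (some i), PySem.List.slice cs (some i) none))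
  let e1 := pvPairs.items.foldl (fun acc pr =>
    splits.foldl (fun acc2 LR =>
      match LR.2 with
      | [] => acc2            -- 'if R and …' : an empty R is falsy
      | r0 :: _ =>
        if r0 == pr.1 then
          acc2 ++ [String.ofList (LR.1 ++ [pr.2] ++ PySem.List.slice LR.2 (some 1) none)]
        else acc2) acc) []
  PySem.Set.ofList e1

-- ===== PORT B =====
def edit1_diacritics_py_alt (word : String) : List String :=
  let cs := word.toList
  -- positions.setdefault(c, []).append(i)  ==  positions[c] = positions.get(c, []) + [i]
  let positions : PySem.Dict Char (List Int) :=
    (PySem.List.enumerate cs).foldl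
      (fun d ic => d.modify ic.2 [] (fun l => l ++ [ic.1])) PySem.Dict.empty
  PySem.Set.ofList (pvPairs.items.flatMap (fun pr =>
    (positions.getD pr.1 []).map (fun i =>
      String.ofList (PySem.List.slice cs none (some i) ++ [pr.2] ++
                     PySem.List.slice cs (some (i + 1)) none))))

-- ===== PRECONDITION & SPEC =====
def Spec_edit1_diacritics_py (word : String) (out : List String) : Prop := out = edit1_diacritics_py_alt word
instance (word : String) (out : List String) : Decidable (Spec_edit1_diacritics_py word out) := by unfold Spec_edit1_diacritics_py; infer_instance

-- ===== CLAIM (what is proved, stated in full; the proofs are below) =====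
def Claim_equal_edit1_diacritics_py : Prop := ∀ (word : String), Dom_edit1_diacritics_py word → Spec_edit1_diacritics_py word (edit1_diacritics_py word)

-- ===== LEMMAS AND PROOFS =====

-- the ascending list of positions at which `o` occurs in `cs`
def pvMatchIdx : List Char → Char → List Nat
  | [], _ => []
  | c :: cs, o => (if c == o then [0] else []) ++ (pvMatchIdx cs o).map (· + 1)

-- B's enumerate-filter, restricted to letter `o`, is pvMatchIdx shifted by the start index
theorem pv_enum_filter (cs : List Char) (o : Char) : ∀ (s : Int),
    ((PySem.List.enumerate cs s).filter (fun ic => ic.2 == o)).map (·.1)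
      = (pvMatchIdx cs o).map (fun (k : Nat) => s + (k : Int)) := by
  induction cs with
  | nil => intro s; simp [PySem.List.enumerate_nil, pvMatchIdx]
  | cons c cs ih =>
    intro s
    simp only [PySem.List.enumerate_cons, List.filter_cons, pvMatchIdx]
    by_cases h : c == o
    · simp only [h, if_pos, List.map_cons, List.map_append, ih (s + 1)]
      simp only [List.map_map, List.map_nil]
      congr 1
      · simp
      · apply List.map_congr_left; intro a _; simp only [Function.comp]; push_cast; ring
    · simp only [h, if_neg, Bool.false_eq_true, not_false_iff, ih (s + 1)]
      simp
      intro a _; ring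

-- the positions dict B builds, looked up at `o`, lists exactly the positions of `o`
theorem pv_positions_getD (cs : List Char) (o : Char) :
    ((PySem.List.enumerate cs).foldl
        (fun d ic => d.modify ic.2 [] (fun l => l ++ [ic.1])) PySem.Dict.empty).getD o []
      = (pvMatchIdx cs o).map (fun (k : Nat) => (k : Int)) := by
  have hswap :
      (PySem.List.enumerate cs).foldl
          (fun d ic => d.modify ic.2 [] (fun l => l ++ [ic.1])) PySem.Dict.empty
        = ((PySem.List.enumerate cs).map (fun ic => (ic.2, ic.1))).foldl
            (fun d p => d.modify p.1 [] (fun l => l ++ [p.2])) PySem.Dict.empty := by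
    rw [List.foldl_map]
  rw [hswap, PySem.Dict.getD_foldl_modify_append]
  have h2 := pv_enum_filter cs o 0
  simp only [List.filter_map, List.map_map]
  rw [show ((fun (x : Char × Int) => x.2) ∘ fun (ic : Int × Char) => (ic.2, ic.1)) = fun (ic : Int × Char) => ic.1 from rfl,
      show ((fun (p : Char × Int) => p.1 == o) ∘ fun (ic : Int × Char) => (ic.2, ic.1)) = fun (ic : Int × Char) => ic.2 == o from rfl]
  simp only [PySem.Dict.getD_empty, List.nil_append]
  simpa using h2

-- A's inner loop over the splits of the word (prefix `pre` fixed, positions relative to `cs`)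
theorem pv_inner (o r : Char) : ∀ (cs pre : List Char) (acc : List String),
    ((List.range (cs.length + 1)).map (fun k => ((pre ++ cs.take k : List Char), cs.drop k))).foldl
      (fun acc2 LR =>
        match LR.2 with
        | [] => acc2
        | r0 :: _ =>
          if r0 == o then
            acc2 ++ [String.ofList (LR.1 ++ [r] ++ PySem.List.slice LR.2 (some 1) none)]
          else acc2) acc
    = acc ++ (pvMatchIdx cs o).map
        (fun k => String.ofList (pre ++ cs.take k ++ [r] ++ cs.drop (k + 1))) := by
  intro cs
  induction cs with
  | nil => intro pre acc; simp [pvMatchIdx]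
  | cons c cs ih =>
    intro pre acc
    rw [List.range_succ_eq_map]
    simp only [List.map_cons, List.map_map, List.foldl_cons, List.take_zero, List.drop_zero,
      List.append_nil, pvMatchIdx]
    have comp_eq : ((fun k => ((pre ++ (c :: cs).take k : List Char), (c :: cs).drop k)) ∘ Nat.succ)
        = fun k => (((pre ++ [c]) ++ cs.take k : List Char), cs.drop k) := by
      funext k
      simp [List.take_succ_cons, List.drop_succ_cons, List.append_assoc]
    rw [comp_eq]
    by_cases h : c == o
    · simp only [h, if_pos]
      simp only [List.length_cons]
      rw [ih (pre ++ [c])]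
      simp [PySem.List.slice_from_one, List.append_assoc, List.map_map, Function.comp,
        List.take_succ_cons, List.drop_succ_cons]
      intro a _
      rw [show (c :: (List.take a cs ++ r :: List.drop (a + 1) cs))
            = (c :: List.take a cs) ++ (r :: List.drop (a + 1) cs) by simp,
          String.ofList_append]
    · simp only [h]
      rw [if_neg (by simp)]
      simp only [List.length_cons]
      rw [ih (pre ++ [c])]
      simp [List.append_assoc, List.map_map, Function.comp, List.take_succ_cons,
        List.drop_succ_cons]
      intro a _
      rw [show (c :: (List.take a cs ++ r :: List.drop (a + 1) cs))
            = (c :: List.take a cs) ++ (r :: List.drop (a + 1) cs) by simp,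
          String.ofList_append]

theorem pv_eq (word : String) : edit1_diacritics_py word = edit1_diacritics_py_alt word := by
  simp only [edit1_diacritics_py, edit1_diacritics_py_alt]
  set cs := word.toList with hcs
  congr 1
  have hsplits : (PySem.List.pyRange 0 ((cs.length : Int) + 1) 1).map
      (fun i => (PySem.List.slice cs none (some i), PySem.List.slice cs (some i) none))
      = (List.range (cs.length + 1)).map (fun k => (([] ++ cs.take k : List Char), cs.drop k)) := by
    rw [show ((cs.length : Int) + 1) = ((cs.length + 1 : Nat) : Int) by push_cast; ring]
    rw [PySem.List.pyRange_zero_natCast, List.map_map]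
    apply List.map_congr_left; intro k _
    simp [Function.comp, PySem.List.slice_to_natCast, PySem.List.slice_from_natCast]
  rw [hsplits]
  have hA : ∀ (acc : List String),
      pvPairs.items.foldl (fun acc pr =>
        (((List.range (cs.length + 1)).map (fun k => (([] ++ cs.take k : List Char), cs.drop k))).foldl
          (fun acc2 LR =>
            match LR.2 with
            | [] => acc2
            | r0 :: _ =>
              if r0 == pr.1 then
                acc2 ++ [String.ofList (LR.1 ++ [pr.2] ++ PySem.List.slice LR.2 (some 1) none)]
              else acc2) acc)) acc
      = acc ++ pvPairs.items.flatMap (fun pr =>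
          (pvMatchIdx cs pr.1).map (fun k => String.ofList ([] ++ cs.take k ++ [pr.2] ++ cs.drop (k + 1)))) := by
    intro acc
    rw [show (fun (acc : List String) (pr : Char × Char) =>
        (((List.range (cs.length + 1)).map (fun k => (([] ++ cs.take k : List Char), cs.drop k))).foldl
          (fun acc2 LR =>
            match LR.2 with
            | [] => acc2
            | r0 :: _ =>
              if r0 == pr.1 then
                acc2 ++ [String.ofList (LR.1 ++ [pr.2] ++ PySem.List.slice LR.2 (some 1) none)]
              else acc2) acc))
      = (fun acc pr => acc ++ (pvMatchIdx cs pr.1).map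
          (fun k => String.ofList ([] ++ cs.take k ++ [pr.2] ++ cs.drop (k + 1)))) from
        funext fun acc => funext fun pr => pv_inner pr.1 pr.2 cs [] acc]
    exact PySem.List.foldl_append_eq_flatMap _ _ _
  rw [hA]
  simp only [List.nil_append]
  apply List.flatMap_congr
  intro pr _
  rw [pv_positions_getD cs pr.1, List.map_map]
  apply List.map_congr_left; intro k _
  simp only [Function.comp, PySem.List.slice_to_natCast]
  rw [show ((k : Int) + 1) = ((k + 1 : Nat) : Int) by push_cast; ring,
     PySem.List.slice_from_natCast]

-- ===== VERDICT (by name: the statement is the Claim_ definition above) =====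
theorem edit1_diacritics_py_spec : Claim_equal_edit1_diacritics_py := by
  intro word _
  unfold Spec_edit1_diacritics_py
  exact pv_eq word
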